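-- pv_equiv track=rewrite | github.com/rakibalfahad/LatentDynamicsBayes | generate_sample_data.py | find_contiguous_regions
-- ===== SOURCE A (Python) =====
-- def find_contiguous_regions(mask):
--     """Find contiguous regions in a boolean array."""
--     in_region = False
--     start = 0
--     regions = []
--
--     for i, val in enumerate(mask):
--         if val and not in_region:
--             in_region = True
--             start = i
--         elif not val and in_region:
--             in_region = False
--             regions.append((start, i))
--
--     if in_region:
--         regions.append((start, len(mask)))
--
--     return regions
-- ===== SOURCE B (Python) =====
-- def find_contiguous_regions(mask):
--     """Find contiguous regions in a boolean array."""
--     regions = []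
--     n = len(mask)
--     i = 0
--     while i < n:
--         j = i
--         while j < n and bool(mask[j]) == bool(mask[i]):
--             j += 1
--         if mask[i]:
--             regions.append((i, j))
--         i = j
--     return regions
-- ===== Notes on version B (the rewrite author's own statement) =====
-- stated objective: alternative
-- what changed: Replaces A's per-element in_region/start state machine with a run decomposition: an outer loop jumps from one maximal run of equal truth values to the next (inner scan finds the run end) and emits (start, end) for each True run.
import Mathlib
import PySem

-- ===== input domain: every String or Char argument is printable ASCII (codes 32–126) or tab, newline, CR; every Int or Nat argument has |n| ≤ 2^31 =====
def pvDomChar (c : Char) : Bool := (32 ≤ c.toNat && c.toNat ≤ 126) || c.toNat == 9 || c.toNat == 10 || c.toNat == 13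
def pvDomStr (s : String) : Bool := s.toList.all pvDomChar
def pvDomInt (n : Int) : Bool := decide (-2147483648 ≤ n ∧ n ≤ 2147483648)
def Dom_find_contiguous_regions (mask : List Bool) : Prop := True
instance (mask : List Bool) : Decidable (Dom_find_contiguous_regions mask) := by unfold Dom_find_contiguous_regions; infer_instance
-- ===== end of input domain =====

-- B replaces A's per-element in_region/start state machine by an outer loop that jumps
-- over maximal runs of equal truth values (inner scan finds each run's end); alternative
-- decomposition, same cost.

-- ===== PORT A =====
def find_contiguous_regions (mask : List Bool) : List (Int × Int) :=
  let res := (PySem.List.enumerate mask).foldl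
    (fun (st : Bool × Int × List (Int × Int)) iv =>
      let in_region := st.1; let start := st.2.1; let regions := st.2.2
      let i := iv.1; let val := iv.2
      if val && !in_region then (true, i, regions)
      else if !val && in_region then (false, start, regions ++ [(start, i)])
      else st)
    (false, 0, [])
  if res.1 then res.2.2 ++ [(res.2.1, (mask.length : Int))] else res.2.2

-- ===== PORT B =====
-- Source B's two nested whiles over indices, transcribed on the remaining list:
-- goB is the outer loop standing at position `off` (= i) with the remaining list;
-- goRun is the inner scan through the run of value `x` that started at `start` (= i),
-- with `j` the current position; when the run ends it emits (start, j) if x and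
-- returns control to the outer loop.
mutual
def goB (off : Int) : List Bool → List (Int × Int)
  | [] => []
  | x :: xs => goRun off (off + 1) x xs
termination_by l => 2 * l.length
decreasing_by all_goals (simp [List.length_cons] <;> omega)
def goRun (start j : Int) (x : Bool) : List Bool → List (Int × Int)
  | [] => if x then [(start, j)] else []
  | y :: ys =>
    if y == x then goRun start (j + 1) x ys
    else if x then (start, j) :: goB j (y :: ys) else goB j (y :: ys)
termination_by l => 2 * l.length + 1
decreasing_by all_goals (simp [List.length_cons] <;> omega)
end

def find_contiguous_regions_alt (mask : List Bool) : List (Int × Int) :=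
  goB 0 mask

-- ===== PRECONDITION & SPEC =====
def Spec_find_contiguous_regions (mask : List Bool) (out : List (Int × Int)) : Prop := out = find_contiguous_regions_alt mask
instance (mask : List Bool) (out : List (Int × Int)) : Decidable (Spec_find_contiguous_regions mask out) := by unfold Spec_find_contiguous_regions; infer_instance

-- ===== CLAIM (what is proved, stated in full; the proofs are below) =====
def Claim_equal_find_contiguous_regions : Prop := ∀ (mask : List Bool), Dom_find_contiguous_regions mask → Spec_find_contiguous_regions mask (find_contiguous_regions mask)

-- ===== LEMMAS AND PROOFS =====

-- an element-wise reference recursion mirroring A's state machine, with the regions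
-- accumulated so far factored out
def steps (i : Int) (inr : Bool) (s : Int) : List Bool → List (Int × Int)
  | [] => if inr then [(s, i)] else []
  | b :: bs =>
    if b then
      (if inr then steps (i+1) true s bs else steps (i+1) true i bs)
    else
      (if inr then (s, i) :: steps (i+1) false s bs else steps (i+1) false s bs)

-- A's fold = steps (regions accumulator factored out, running index generalized)
theorem stepA_loop (l : List Bool) : ∀ (i s : Int) (inr : Bool) (regs : List (Int × Int)),
    (let res := (PySem.List.enumerate l i).foldl
      (fun (st : Bool × Int × List (Int × Int)) iv =>
        let in_region := st.1; let start := st.2.1; let regions := st.2.2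
        let j := iv.1; let val := iv.2
        if val && !in_region then (true, j, regions)
        else if !val && in_region then (false, start, regions ++ [(start, j)])
        else st)
      (inr, s, regs)
     if res.1 then res.2.2 ++ [(res.2.1, i + (l.length : Int))] else res.2.2)
    = regs ++ steps i inr s l := by
  induction l with
  | nil =>
    intro i s inr regs
    cases inr <;> simp [PySem.List.enumerate_nil, steps]
  | cons b bs ih =>
    intro i s inr regs
    cases b with
    | false =>
      cases inr with
      | false =>
        simpa [steps, PySem.List.enumerate_cons, add_comm, add_left_comm, add_assoc]
          using ih (i+1) s false regs
      | true =>
        simpa [steps, PySem.List.enumerate_cons, add_comm, add_left_comm, add_assoc,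
          List.append_assoc] using ih (i+1) s false (regs ++ [(s, i)])
    | true =>
      cases inr with
      | false =>
        simpa [steps, PySem.List.enumerate_cons, add_comm, add_left_comm, add_assoc]
          using ih (i+1) i true regs
      | true =>
        simpa [steps, PySem.List.enumerate_cons, add_comm, add_left_comm, add_assoc]
          using ih (i+1) s true regs

-- B's mutual loops = steps, by strong induction on the length
theorem goB_goRun_eq_steps (n : Nat) :
    (∀ l : List Bool, l.length ≤ n → ∀ (j s : Int), goB j l = steps j false s l)
    ∧ (∀ l : List Bool, l.length ≤ n → ∀ (s j : Int), goRun s j true l = steps j true s l)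
    ∧ (∀ l : List Bool, l.length ≤ n → ∀ (s s' j : Int), goRun s j false l = steps j false s' l) := by
  induction n with
  | zero =>
    refine ⟨?_, ?_, ?_⟩ <;> intro l hl
    all_goals
      match l, hl with
      | [], _ => intros; simp [goB, goRun, steps]
  | succ n ih =>
    obtain ⟨ihB, ihT, ihF⟩ := ih
    have hA : ∀ l : List Bool, l.length ≤ n + 1 → ∀ (j s : Int), goB j l = steps j false s l := by
      intro l hl j s
      match l with
      | [] => simp [goB, steps]
      | x :: xs =>
        have hxs : xs.length ≤ n := by simp at hl; omega
        cases x with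
        | true => simpa [goB, steps] using ihT xs hxs j (j+1)
        | false => simpa [goB, steps] using ihF xs hxs j s (j+1)
    refine ⟨hA, ?_, ?_⟩
    · intro l hl s j
      match l with
      | [] => simp [goRun, steps]
      | y :: ys =>
        have hys : ys.length ≤ n := by simp at hl; omega
        cases y with
        | true => simpa [goRun, steps] using ihT ys hys s (j+1)
        | false =>
          have h := hA (false :: ys) hl j s
          simp only [steps] at h
          simpa [goRun, steps] using h
    · intro l hl s s' j
      match l with
      | [] => simp [goRun, steps]
      | y :: ys =>
        have hys : ys.length ≤ n := by simp at hl; omega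
        cases y with
        | false => simpa [goRun, steps] using ihF ys hys s s' (j+1)
        | true =>
          have h := hA (true :: ys) hl j s'
          simp only [steps] at h
          simpa [goRun, steps] using h

-- ===== VERDICT (by name: the statement is the Claim_ definition above) =====
theorem find_contiguous_regions_spec : Claim_equal_find_contiguous_regions := by
  intro mask _
  show find_contiguous_regions mask = find_contiguous_regions_alt mask
  unfold find_contiguous_regions find_contiguous_regions_alt
  rw [(goB_goRun_eq_steps mask.length).1 mask le_rfl 0 0]
  simpa using stepA_loop mask 0 0 false []
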